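-- pv_equiv track=rewrite | github.com/clulab/releases | emnlp2020-capsnet/caps-cnn/code/loadutils.py | capitalizaion
-- ===== SOURCE A (Python) =====
-- def capitalizaion(word):
--     """
--     check capitalization info for a word
--     return 'lowercase' for 'sfsd'
--     return 'allCaps' for 'SFSD'
--     return 'upperInitial' for 'Sfsd'
--     return 'mixedCaps' for 'SfSd'
--     return 'noinfo' for '$#%@#' or '12334'
--     """
--     alphas = [c.isalpha() for c in word]
--     if sum(alphas) != len(word):
--         return 'noinfo'
--     caps = [char.lower()==char for char in word]
--     if sum(caps) == len(word):
--         return 'lowercase'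
--     elif sum(caps) == 0:
--         return 'allCaps'
--     elif caps[0] == False and sum(caps) == len(word)-1:
--         return 'upperInitial'
--     elif 0 < sum(caps) < len(word):
--         return 'mixedCaps'
--     else:
--         return 'noinfo'
-- ===== SOURCE B (Python) =====
-- # DFA classification: one left-to-right pass over the word through an explicit
-- # finite-state machine (transition tables), returning 'noinfo' the moment a
-- # non-alphabetic character appears.  States:
-- #   E  - nothing read yet
-- #   L  - all letters so far lowercase
-- #   U1 - exactly one letter read, uppercase
-- #   U  - two or more letters read, all uppercase
-- #   I  - first letter uppercase, the rest (at least one) lowercase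
-- #   M  - any other mixture
-- _ON_LOWER = {'E': 'L', 'L': 'L', 'U1': 'I', 'U': 'M', 'I': 'I', 'M': 'M'}
-- _ON_UPPER = {'E': 'U1', 'L': 'M', 'U1': 'U', 'U': 'U', 'I': 'M', 'M': 'M'}
-- _FINAL = {'E': 'lowercase', 'L': 'lowercase', 'U1': 'allCaps',
--           'U': 'allCaps', 'I': 'upperInitial', 'M': 'mixedCaps'}
--
-- def capitalizaion(word):
--     state = 'E'
--     for c in word:
--         if not c.isalpha():
--             return 'noinfo'
--         state = _ON_UPPER[state] if c.isupper() else _ON_LOWER[state]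
--     return _FINAL[state]
-- ===== Notes on version B (the rewrite author's own statement) =====
-- stated objective: alternative
-- what changed: B replaces A's three staged boolean-list-and-sum passes with a single left-to-right pass through an explicit six-state finite automaton (transition tables) that exits early at the first non-alphabetic character.
import Mathlib
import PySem

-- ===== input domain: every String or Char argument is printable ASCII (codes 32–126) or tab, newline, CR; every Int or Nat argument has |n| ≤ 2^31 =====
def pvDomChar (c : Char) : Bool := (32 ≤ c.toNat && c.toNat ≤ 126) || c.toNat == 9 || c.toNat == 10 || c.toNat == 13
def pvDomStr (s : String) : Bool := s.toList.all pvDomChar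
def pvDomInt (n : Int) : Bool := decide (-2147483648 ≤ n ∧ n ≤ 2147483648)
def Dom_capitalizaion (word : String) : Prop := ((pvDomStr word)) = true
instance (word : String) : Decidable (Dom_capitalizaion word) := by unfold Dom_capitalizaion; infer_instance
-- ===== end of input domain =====

-- B classifies the word in ONE pass through an explicit six-state finite automaton
-- (early exit on a non-alphabetic character) instead of A's staged boolean-list sums.

-- ===== PORT A =====
def capitalizaion (word : String) : String :=
  let alphas : List Bool := word.toList.map (fun c => PySem.Chars.isalpha c)
  if (alphas.map (fun b => if b = true then (1 : Int) else 0)).sum ≠ PySem.Str.len word then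
    "noinfo"
  else
    let caps : List Bool := word.toList.map (fun c => PySem.Chars.lowerChar c == c)
    if (caps.map (fun b => if b = true then (1 : Int) else 0)).sum = PySem.Str.len word then
      "lowercase"
    else if (caps.map (fun b => if b = true then (1 : Int) else 0)).sum = 0 then
      "allCaps"
    else if PySem.List.pyGetD caps 0 true = false ∧
        (caps.map (fun b => if b = true then (1 : Int) else 0)).sum = PySem.Str.len word - 1 then
      "upperInitial"
    else if 0 < (caps.map (fun b => if b = true then (1 : Int) else 0)).sum ∧
        (caps.map (fun b => if b = true then (1 : Int) else 0)).sum < PySem.Str.len word then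
      "mixedCaps"
    else
      "noinfo"

-- ===== PORT B =====
-- The DFA states of Source B ('E','L','U1','U','I','M') as an inductive type.
inductive CapState : Type
  | E | L | U1 | U | I | M
deriving DecidableEq, Repr

-- transition table _ON_LOWER of Source B
def capOnLower : CapState → CapState
  | CapState.E => CapState.L
  | CapState.L => CapState.L
  | CapState.U1 => CapState.I
  | CapState.U => CapState.M
  | CapState.I => CapState.I
  | CapState.M => CapState.M

-- transition table _ON_UPPER of Source B
def capOnUpper : CapState → CapState
  | CapState.E => CapState.U1
  | CapState.L => CapState.M
  | CapState.U1 => CapState.U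
  | CapState.U => CapState.U
  | CapState.I => CapState.M
  | CapState.M => CapState.M

-- table _FINAL of Source B
def capFinal : CapState → String
  | CapState.E => "lowercase"
  | CapState.L => "lowercase"
  | CapState.U1 => "allCaps"
  | CapState.U => "allCaps"
  | CapState.I => "upperInitial"
  | CapState.M => "mixedCaps"

-- the for-loop of Source B with its early return on a non-alphabetic character
def capRun (s : CapState) : List Char → String
  | [] => capFinal s
  | c :: rest =>
    if PySem.Chars.isalpha c = false then "noinfo"
    else capRun (if PySem.Chars.isupper c then capOnUpper s else capOnLower s) rest

def capitalizaion_alt (word : String) : String :=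
  capRun CapState.E word.toList

-- ===== PRECONDITION & SPEC =====
def Spec_capitalizaion (word : String) (out : String) : Prop := out = capitalizaion_alt word
instance (word : String) (out : String) : Decidable (Spec_capitalizaion word out) := by unfold Spec_capitalizaion; infer_instance

-- ===== CLAIM (what is proved, stated in full; the proofs are below) =====
def Claim_equal_capitalizaion : Prop := ∀ (word : String), Dom_capitalizaion word → Spec_capitalizaion word (capitalizaion word)

-- ===== LEMMAS AND PROOFS =====

-- common normal form both programs are reduced to (proof-only helper)
def pvClassify (cs : List Char) : String :=
  if cs.all (fun c => PySem.Chars.isalpha c) = false then "noinfo"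
  else if cs.countP (fun c => PySem.Chars.isupper c) = 0 then "lowercase"
  else if cs.countP (fun c => PySem.Chars.isupper c) = cs.length then "allCaps"
  else if cs.countP (fun c => PySem.Chars.isupper c) = 1 ∧
      cs.head?.elim false (fun c => PySem.Chars.isupper c) then "upperInitial"
  else "mixedCaps"

lemma pv_sum_bools {α : Type} (p : α → Bool) (xs : List α) :
    ((xs.map p).map (fun b => if b = true then (1 : Int) else 0)).sum = xs.countP p := by
  rw [List.map_map]
  exact PySem.List.sum_map_ite_one_zero p xs

lemma pv_isupper_bounds (c : Char) (h : PySem.Chars.isupper c = true) :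
    65 ≤ c.toNat ∧ c.toNat ≤ 90 := by
  simp only [PySem.Chars.isupper, Bool.and_eq_true, decide_eq_true_eq, Char.le_def] at h
  obtain ⟨h1, h2⟩ := h
  rw [UInt32.le_iff_toNat_le] at h1 h2
  exact ⟨h1, h2⟩

lemma pv_islower_bounds (c : Char) (h : PySem.Chars.islower c = true) :
    97 ≤ c.toNat ∧ c.toNat ≤ 122 := by
  simp only [PySem.Chars.islower, Bool.and_eq_true, decide_eq_true_eq, Char.le_def] at h
  obtain ⟨h1, h2⟩ := h
  rw [UInt32.le_iff_toNat_le] at h1 h2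
  exact ⟨h1, h2⟩

lemma pv_toNat_ofNat (n : Nat) (h : n.isValidChar) : (Char.ofNat n).toNat = n := by
  simp [Char.ofNat, h, Char.toNat, Char.ofNatAux]

-- for alphabetic (ASCII-letter) c: A's per-char test 'c.lower() == c' is ¬isupper
lemma pv_lowerfixed_eq_not_isupper (c : Char) (h : PySem.Chars.isalpha c = true) :
    (PySem.Chars.lowerChar c == c) = !PySem.Chars.isupper c := by
  simp only [PySem.Chars.isalpha, Bool.or_eq_true] at h
  rcases h with h | h
  · rw [h]
    obtain ⟨h1, h2⟩ := pv_isupper_bounds c h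
    simp only [Bool.not_true, beq_eq_false_iff_ne, ne_eq]
    simp only [PySem.Chars.lowerChar, h, if_true]
    intro hc
    have hv : (c.toNat + 32).isValidChar := by unfold Nat.isValidChar; left; omega
    have := pv_toNat_ofNat (c.toNat + 32) hv
    rw [hc] at this; omega
  · obtain ⟨h1, h2⟩ := pv_islower_bounds c h
    have hup : PySem.Chars.isupper c = false := by
      by_contra hf
      have := pv_isupper_bounds c (by revert hf; cases PySem.Chars.isupper c <;> simp)
      omega
    rw [hup]
    simp [PySem.Chars.lowerChar, hup]

-- count of A's caps-list entries = length − number of uppercase letters (all-alpha lists)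
lemma pv_countP_lowerfixed (cs : List Char) (h : ∀ c ∈ cs, PySem.Chars.isalpha c = true) :
    (cs.countP (fun c => PySem.Chars.lowerChar c == c) : Int) =
      (cs.length : Int) - (cs.countP (fun c => PySem.Chars.isupper c) : Int) := by
  induction cs with
  | nil => simp
  | cons c t ih =>
    have hc := pv_lowerfixed_eq_not_isupper c (h c (List.mem_cons_self ..))
    have iht := ih (fun x hx => h x (List.mem_cons_of_mem _ hx))
    simp only [List.countP_cons, List.length_cons, hc]
    cases hu : PySem.Chars.isupper c <;> simp [hu] at hc ⊢ <;> push_cast <;> omega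

-- characterizations of capRun from each reachable non-initial state
lemma pv_capRun_M (cs : List Char) :
    capRun CapState.M cs =
      if cs.all (fun c => PySem.Chars.isalpha c) then "mixedCaps" else "noinfo" := by
  induction cs with
  | nil => simp [capRun, capFinal]
  | cons c t ih =>
    by_cases ha : PySem.Chars.isalpha c = true
    · by_cases hu : PySem.Chars.isupper c = true <;>
        simp [capRun, ha, hu, capOnLower, capOnUpper, ih]
    · have haf : PySem.Chars.isalpha c = false := by simpa using ha
      simp [capRun, haf]

lemma pv_capRun_L (cs : List Char) :
    capRun CapState.L cs =
      if cs.all (fun c => PySem.Chars.isalpha c) then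
        (if cs.countP (fun c => PySem.Chars.isupper c) = 0 then "lowercase" else "mixedCaps")
      else "noinfo" := by
  induction cs with
  | nil => simp [capRun, capFinal]
  | cons c t ih =>
    by_cases ha : PySem.Chars.isalpha c = true
    · by_cases hu : PySem.Chars.isupper c = true
      · by_cases hall : t.all (fun c => PySem.Chars.isalpha c) = true <;>
          simp [capRun, ha, hu, capOnUpper, pv_capRun_M, List.countP_cons, hall]
      · have huf : PySem.Chars.isupper c = false := by simpa using hu
        by_cases hall : t.all (fun c => PySem.Chars.isalpha c) = true <;>
          simp [capRun, ha, huf, capOnLower, ih, List.countP_cons, hall]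
    · have haf : PySem.Chars.isalpha c = false := by simpa using ha
      simp [capRun, haf]

lemma pv_capRun_I (cs : List Char) :
    capRun CapState.I cs =
      if cs.all (fun c => PySem.Chars.isalpha c) then
        (if cs.countP (fun c => PySem.Chars.isupper c) = 0 then "upperInitial" else "mixedCaps")
      else "noinfo" := by
  induction cs with
  | nil => simp [capRun, capFinal]
  | cons c t ih =>
    by_cases ha : PySem.Chars.isalpha c = true
    · by_cases hu : PySem.Chars.isupper c = true
      · by_cases hall : t.all (fun c => PySem.Chars.isalpha c) = true <;>
          simp [capRun, ha, hu, capOnUpper, pv_capRun_M, List.countP_cons, hall]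
      · have huf : PySem.Chars.isupper c = false := by simpa using hu
        by_cases hall : t.all (fun c => PySem.Chars.isalpha c) = true <;>
          simp [capRun, ha, huf, capOnLower, ih, List.countP_cons, hall]
    · have haf : PySem.Chars.isalpha c = false := by simpa using ha
      simp [capRun, haf]

lemma pv_capRun_U (cs : List Char) :
    capRun CapState.U cs =
      if cs.all (fun c => PySem.Chars.isalpha c) then
        (if cs.countP (fun c => PySem.Chars.isupper c) = cs.length then "allCaps" else "mixedCaps")
      else "noinfo" := by
  induction cs with
  | nil => simp [capRun, capFinal]
  | cons c t ih =>
    have hle : t.countP (fun c => PySem.Chars.isupper c) ≤ t.length := List.countP_le_length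
    by_cases ha : PySem.Chars.isalpha c = true
    · by_cases hu : PySem.Chars.isupper c = true
      · by_cases hall : t.all (fun c => PySem.Chars.isalpha c) = true <;>
          simp [capRun, ha, hu, capOnUpper, ih, List.countP_cons, hall]
      · have huf : PySem.Chars.isupper c = false := by simpa using hu
        by_cases hall : t.all (fun c => PySem.Chars.isalpha c) = true <;>
          simp [capRun, ha, huf, capOnLower, pv_capRun_M, List.countP_cons, hall] <;>
          (try split_ifs) <;> first | rfl | omega
    · have haf : PySem.Chars.isalpha c = false := by simpa using ha
      simp [capRun, haf]

lemma pv_capRun_U1 (cs : List Char) :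
    capRun CapState.U1 cs =
      if cs.all (fun c => PySem.Chars.isalpha c) then
        (if cs.countP (fun c => PySem.Chars.isupper c) = cs.length then "allCaps"
         else if cs.countP (fun c => PySem.Chars.isupper c) = 0 then "upperInitial"
         else "mixedCaps")
      else "noinfo" := by
  induction cs with
  | nil => simp [capRun, capFinal]
  | cons c t ih =>
    have hle : t.countP (fun c => PySem.Chars.isupper c) ≤ t.length := List.countP_le_length
    by_cases ha : PySem.Chars.isalpha c = true
    · by_cases hu : PySem.Chars.isupper c = true
      · by_cases hall : t.all (fun c => PySem.Chars.isalpha c) = true <;>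
          simp [capRun, ha, hu, capOnUpper, pv_capRun_U, List.countP_cons, hall] <;>
          (try split_ifs) <;> first | rfl | omega
      · have huf : PySem.Chars.isupper c = false := by simpa using hu
        by_cases hall : t.all (fun c => PySem.Chars.isalpha c) = true <;>
          simp [capRun, ha, huf, capOnLower, pv_capRun_I, List.countP_cons, hall] <;>
          (try split_ifs) <;> first | rfl | omega
    · have haf : PySem.Chars.isalpha c = false := by simpa using ha
      simp [capRun, haf]

-- B computes the normal form
lemma pv_B_classify (cs : List Char) : capRun CapState.E cs = pvClassify cs := by
  cases cs with
  | nil => simp [capRun, capFinal, pvClassify]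
  | cons c t =>
    have hle : t.countP (fun c => PySem.Chars.isupper c) ≤ t.length := List.countP_le_length
    by_cases ha : PySem.Chars.isalpha c = true
    · by_cases hu : PySem.Chars.isupper c = true
      · by_cases hall : t.all (fun c => PySem.Chars.isalpha c) = true <;>
          simp [capRun, pvClassify, ha, hu, capOnUpper, pv_capRun_U1, List.countP_cons, hall] <;>
          (try split_ifs) <;> first | rfl | omega
      · have huf : PySem.Chars.isupper c = false := by simpa using hu
        by_cases hall : t.all (fun c => PySem.Chars.isalpha c) = true <;>
          simp [capRun, pvClassify, ha, huf, capOnLower, pv_capRun_L, List.countP_cons, hall] <;>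
          (try split_ifs) <;> first | rfl | omega
    · have haf : PySem.Chars.isalpha c = false := by simpa using ha
      simp [capRun, pvClassify, haf]

-- A computes the normal form
lemma pv_A_classify (word : String) : capitalizaion word = pvClassify word.toList := by
  unfold capitalizaion pvClassify
  simp only [pv_sum_bools, PySem.Str.len_eq]
  by_cases hα : ∀ c ∈ word.toList, PySem.Chars.isalpha c = true
  · have hcount : word.toList.countP (fun c => PySem.Chars.isalpha c) = word.toList.length :=
      List.countP_eq_length.mpr hα
    have hall : word.toList.all (fun c => PySem.Chars.isalpha c) = true := List.all_eq_true.mpr hα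
    have hcap := pv_countP_lowerfixed word.toList hα
    have hle : word.toList.countP (fun c => PySem.Chars.isupper c) ≤ word.toList.length :=
      List.countP_le_length
    rw [hcount, hall]
    rw [if_neg (show ¬ (((word.toList.length : Int)) ≠ ((word.toList.length : Int))) by simp),
        if_neg (show ¬ ((true : Bool) = false) by simp)]
    by_cases h0 : word.toList.countP (fun c => PySem.Chars.isupper c) = 0
    · -- no uppercase at all → lowercase on both sides
      rw [if_pos (by rw [hcap, h0]; push_cast; omega), if_pos h0]
    · rw [if_neg (by rw [hcap]; push_cast; omega), if_neg h0]
      by_cases hn : word.toList.countP (fun c => PySem.Chars.isupper c) = word.toList.length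
      · rw [if_pos (by rw [hcap, hn]; push_cast; omega), if_pos hn]
      · rw [if_neg (by rw [hcap]; push_cast; omega), if_neg hn]
        -- the word is nonempty here (countP ≠ 0)
        obtain ⟨c, t, hct⟩ := List.exists_cons_of_ne_nil
          (show word.toList ≠ [] by intro h0'; rw [h0'] at h0; simp at h0)
        have hαc : PySem.Chars.isalpha c = true := hα c (hct ▸ List.mem_cons_self ..)
        have hgetd : PySem.List.pyGetD
            (word.toList.map (fun c => PySem.Chars.lowerChar c == c)) 0 true
            = (PySem.Chars.lowerChar c == c) := by
          rw [hct]; exact PySem.List.pyGetD_zero_cons ..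
        rw [hgetd, pv_lowerfixed_eq_not_isupper c hαc]
        have hhead : word.toList.head?.elim false (fun c => PySem.Chars.isupper c)
            = PySem.Chars.isupper c := by rw [hct]; rfl
        rw [hhead, hcap]
        cases hu : PySem.Chars.isupper c <;>
          simp only [hu, Bool.not_true, Bool.not_false, Bool.true_eq_false, Bool.false_eq_true,
            false_and, and_false, and_true, true_and, if_false] <;>
          (try split_ifs) <;> first | rfl | (push_cast at *; omega)
  · have hlt : word.toList.countP (fun c => PySem.Chars.isalpha c) ≠ word.toList.length := by
      intro he
      exact hα (List.countP_eq_length.mp he)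
    have hall : word.toList.all (fun c => PySem.Chars.isalpha c) = false := by
      rw [← Bool.not_eq_true, List.all_eq_true]
      exact hα
    rw [hall, if_pos (by exact_mod_cast hlt)]
    simp

-- ===== VERDICT (by name: the statement is the Claim_ definition above) =====
theorem capitalizaion_spec : Claim_equal_capitalizaion := by
  intro word _
  unfold Spec_capitalizaion capitalizaion_alt
  rw [pv_A_classify, pv_B_classify]
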